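-- pv_equiv track=rewrite | github.com/mammadsafar/Astrology | backend/get chart/cal power number/app.py | investment
-- ===== SOURCE A (Python) =====
-- def investment(birthNumber):
--     investment_options = {
--         'Stock Market': [1,2,3,4,6,7,8,9],
--         'Tried': [1,7,8,9],
--         'Gold and Metals': [2,3,5]
--     }
--     suitable_investments = [key for key, numbers in investment_options.items() if birthNumber in numbers]
--     return suitable_investments
-- ===== SOURCE B (Python) =====
-- # Precomputed inverted index: birth number -> ordered list of suitable categories.
-- _NUMBER_INDEX = {
--     1: ['Stock Market', 'Tried'],
--     2: ['Stock Market', 'Gold and Metals'],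
--     3: ['Stock Market', 'Gold and Metals'],
--     4: ['Stock Market'],
--     5: ['Gold and Metals'],
--     6: ['Stock Market'],
--     7: ['Stock Market', 'Tried'],
--     8: ['Stock Market', 'Tried'],
--     9: ['Stock Market', 'Tried'],
-- }
--
-- def investment(birthNumber):
--     return _NUMBER_INDEX.get(birthNumber, [])
-- ===== Notes on version B (the rewrite author's own statement) =====
-- stated objective: simpler
-- what changed: B replaces the per-call membership scan of every category's number list with a precomputed inverted index (birth number -> ordered category list) answered by a single dict lookup with [] as default.
import Mathlib
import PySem

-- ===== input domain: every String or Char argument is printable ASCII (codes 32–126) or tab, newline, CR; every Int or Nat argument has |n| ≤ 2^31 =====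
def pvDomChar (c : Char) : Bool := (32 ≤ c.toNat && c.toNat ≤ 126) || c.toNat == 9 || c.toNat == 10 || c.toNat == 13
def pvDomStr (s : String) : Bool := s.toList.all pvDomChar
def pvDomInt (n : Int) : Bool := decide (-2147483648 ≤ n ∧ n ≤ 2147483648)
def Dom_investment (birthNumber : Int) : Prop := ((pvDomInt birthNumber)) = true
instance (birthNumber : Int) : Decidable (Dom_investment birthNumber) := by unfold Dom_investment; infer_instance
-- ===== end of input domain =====

-- B answers with a precomputed inverted index (birth number -> ordered categories) via one dict lookup instead of scanning each category's number list; same return value.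
-- ===== PORT A =====
def investment (birthNumber : Int) : List String :=
  let investment_options : PySem.Dict String (List Int) :=
    PySem.Dict.ofList [("Stock Market", [1,2,3,4,6,7,8,9]), ("Tried", [1,7,8,9]), ("Gold and Metals", [2,3,5])]
  let suitable_investments :=
    (investment_options.items.filter (fun kv => kv.2.contains birthNumber)).map (fun kv => kv.1)
  suitable_investments

-- ===== PORT B =====
def numberIndex : PySem.Dict Int (List String) :=
  PySem.Dict.ofList
    [(1, ["Stock Market", "Tried"]),
     (2, ["Stock Market", "Gold and Metals"]),
     (3, ["Stock Market", "Gold and Metals"]),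
     (4, ["Stock Market"]),
     (5, ["Gold and Metals"]),
     (6, ["Stock Market"]),
     (7, ["Stock Market", "Tried"]),
     (8, ["Stock Market", "Tried"]),
     (9, ["Stock Market", "Tried"])]

def investment_alt (birthNumber : Int) : List String :=
  numberIndex.getD birthNumber []

-- ===== PRECONDITION & SPEC =====
def Spec_investment (birthNumber : Int) (out : List String) : Prop := out = investment_alt birthNumber
instance (birthNumber : Int) (out : List String) : Decidable (Spec_investment birthNumber out) := by unfold Spec_investment; infer_instance

-- ===== CLAIM (what is proved, stated in full; the proofs are below) =====
def Claim_equal_investment : Prop := ∀ (birthNumber : Int), Dom_investment birthNumber → Spec_investment birthNumber (investment birthNumber)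

-- ===== LEMMAS AND PROOFS =====
theorem items_lit :
    (PySem.Dict.ofList [("Stock Market", [(1:Int),2,3,4,6,7,8,9]), ("Tried", [1,7,8,9]), ("Gold and Metals", [2,3,5])]).items
    = [("Stock Market", [(1:Int),2,3,4,6,7,8,9]), ("Tried", [1,7,8,9]), ("Gold and Metals", [2,3,5])] := by
  decide

theorem index_lit :
    numberIndex
    = PySem.Dict.mk [((1:Int),["Stock Market","Tried"]), (2,["Stock Market","Gold and Metals"]), (3,["Stock Market","Gold and Metals"]), (4,["Stock Market"]), (5,["Gold and Metals"]), (6,["Stock Market"]), (7,["Stock Market","Tried"]), (8,["Stock Market","Tried"]), (9,["Stock Market","Tried"])] := by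
  decide

theorem investment_eq (n : Int) : investment n = investment_alt n := by
  by_cases h1 : n = 1; · subst h1; simp only [investment, investment_alt]; rw [items_lit, index_lit]; decide
  by_cases h2 : n = 2; · subst h2; simp only [investment, investment_alt]; rw [items_lit, index_lit]; decide
  by_cases h3 : n = 3; · subst h3; simp only [investment, investment_alt]; rw [items_lit, index_lit]; decide
  by_cases h4 : n = 4; · subst h4; simp only [investment, investment_alt]; rw [items_lit, index_lit]; decide
  by_cases h5 : n = 5; · subst h5; simp only [investment, investment_alt]; rw [items_lit, index_lit]; decide
  by_cases h6 : n = 6; · subst h6; simp only [investment, investment_alt]; rw [items_lit, index_lit]; decide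
  by_cases h7 : n = 7; · subst h7; simp only [investment, investment_alt]; rw [items_lit, index_lit]; decide
  by_cases h8 : n = 8; · subst h8; simp only [investment, investment_alt]; rw [items_lit, index_lit]; decide
  by_cases h9 : n = 9; · subst h9; simp only [investment, investment_alt]; rw [items_lit, index_lit]; decide
  simp only [investment, investment_alt]
  rw [items_lit, index_lit]
  simp [PySem.Dict.getD, PySem.Dict.get?_mk_cons, h1, h2, h3, h4, h5, h6, h7, h8, h9,
    Ne.symm h1, Ne.symm h2, Ne.symm h3, Ne.symm h4, Ne.symm h5, Ne.symm h6, Ne.symm h7, Ne.symm h8, Ne.symm h9]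
  rfl

-- ===== VERDICT (by name: the statement is the Claim_ definition above) =====
theorem investment_spec : Claim_equal_investment := by
  intro n _
  exact investment_eq n
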